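-- pv_equiv track=rewrite | github.com/Liiesl/FINALLY_I_CAN_CODE | tools/subtitleconverter/vtt_converter.py | txt_to_vtt
-- ===== SOURCE A (Python) =====
-- def txt_to_vtt(content):
--     # Example logic for converting TXT to VTT
--     vtt_content = "WEBVTT\n\n"
--     lines = content.splitlines()
--     for i in range(0, len(lines), 2):
--         if i + 1 < len(lines):
--             vtt_content += f"{i//2 + 1}\n"
--             vtt_content += f"{lines[i]}\n{lines[i+1]}\n\n"
--     return vtt_content
-- ===== SOURCE B (Python) =====
-- def txt_to_vtt(content):
--     # Consume the lines as a stack: reverse once, then pop two lines per cue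
--     # while keeping an explicit cue counter; collect blocks and join at the end.
--     stack = content.splitlines()
--     stack.reverse()
--     parts = ["WEBVTT\n\n"]
--     n = 0
--     while len(stack) >= 2:
--         n += 1
--         first = stack.pop()
--         second = stack.pop()
--         parts.append(f"{n}\n{first}\n{second}\n\n")
--     return "".join(parts)
-- ===== Notes on version B (the rewrite author's own statement) =====
-- stated objective: alternative
-- what changed: Replaces A's index-stepped range(0, len, 2) loop with i//2+1 numbering and string += by consuming a reversed line stack: a while loop pops two lines per cue, keeps an explicit cue counter, and the blocks are collected in a list joined once at the end.
import Mathlib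
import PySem

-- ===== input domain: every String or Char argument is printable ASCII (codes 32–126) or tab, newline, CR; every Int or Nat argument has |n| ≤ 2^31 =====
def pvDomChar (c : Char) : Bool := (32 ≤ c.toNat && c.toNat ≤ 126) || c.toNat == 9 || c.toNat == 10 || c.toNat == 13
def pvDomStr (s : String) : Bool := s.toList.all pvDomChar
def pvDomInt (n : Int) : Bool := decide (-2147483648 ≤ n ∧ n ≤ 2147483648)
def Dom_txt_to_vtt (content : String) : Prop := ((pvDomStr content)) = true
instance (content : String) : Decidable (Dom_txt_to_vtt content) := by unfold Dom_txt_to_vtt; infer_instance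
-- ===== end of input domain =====

-- B consumes a reversed line stack with a while loop popping two lines per cue and an
-- explicit counter, collecting the blocks in a list joined once at the end (alternative).

-- ===== PORT A =====
-- literal port of A: fold over range(0, len(lines), 2), appending each cue block to the
-- accumulated string (strings handled as List Char; PySem.Chars/Int are Python-exact)
def txt_to_vtt (content : String) : String :=
  let lines : List (List Char) := PySem.Chars.splitlines content.toList
  String.ofList ((PySem.List.pyRange 0 (PySem.List.len lines) 2).foldl
    (fun vtt i =>
      if i + 1 < PySem.List.len lines then
        vtt ++ PySem.Int.toChars (PySem.Int.floordiv i 2 + 1) ++ ['\n']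
            ++ PySem.List.pyGetD lines i [] ++ ['\n']
            ++ PySem.List.pyGetD lines (i + 1) [] ++ ['\n', '\n']
      else vtt)
    "WEBVTT\n\n".toList)

-- ===== PORT B =====
-- the while loop of Source B: while len(stack) >= 2, pop the last two elements of the stack
-- (viewed through stack.reverse: stack[-1] is the head of stack.reverse) and append the
-- formatted block to parts; a pop from the end is exact as head-of-reverse
def pvWhilePop (stack : List (List Char)) (n : Int) (parts : List (List Char)) :
    List (List Char) :=
  match h : stack.reverse with
  | first :: second :: restRev =>
      pvWhilePop restRev.reverse (n + 1)
        (parts ++ [PySem.Int.toChars (n + 1) ++ ['\n'] ++ first ++ ['\n']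
                    ++ second ++ ['\n', '\n']])
  | _ => parts
termination_by stack.length
decreasing_by
  have hl := congrArg List.length h
  simp at hl ⊢
  omega

def txt_to_vtt_alt (content : String) : String :=
  let stack : List (List Char) := (PySem.Chars.splitlines content.toList).reverse
  String.ofList (PySem.Chars.join [] (pvWhilePop stack 0 ["WEBVTT\n\n".toList]))

-- ===== PRECONDITION & SPEC =====
def Spec_txt_to_vtt (content : String) (out : String) : Prop := out = txt_to_vtt_alt content
instance (content : String) (out : String) : Decidable (Spec_txt_to_vtt content out) := by unfold Spec_txt_to_vtt; infer_instance

-- ===== CLAIM (what is proved, stated in full; the proofs are below) =====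
def Claim_equal_txt_to_vtt : Prop := ∀ (content : String), Dom_txt_to_vtt content → Spec_txt_to_vtt content (txt_to_vtt content)

-- ===== LEMMAS AND PROOFS =====

-- proof-side recursion scheme: two list elements at a time
def pvPairUp {α : Type} : List α → List (α × α)
  | a :: b :: rest => (a, b) :: pvPairUp rest
  | _ => []

-- joining on the empty separator just concatenates
theorem pv_join_nil_cons (p : List Char) (l : List (List Char)) :
    PySem.Chars.join [] (p :: l) = p ++ PySem.Chars.join [] l := by
  cases l with
  | nil => simp [PySem.Chars.join_singleton, PySem.Chars.join_nil]
  | cons q l' => simpa using PySem.Chars.join_cons_cons [] p q l'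

theorem pv_join_append (l1 l2 : List (List Char)) :
    PySem.Chars.join [] (l1 ++ l2) = PySem.Chars.join [] l1 ++ PySem.Chars.join [] l2 := by
  induction l1 with
  | nil => simp [PySem.Chars.join_nil]
  | cons p t ih => simp [pv_join_nil_cons, ih]

-- one step of the while loop when at least two lines remain
theorem pvWhilePop_cons2 (a b : List Char) (rest : List (List Char)) (n : Int)
    (parts : List (List Char)) :
    pvWhilePop (a :: b :: rest).reverse n parts
      = pvWhilePop rest.reverse (n + 1)
          (parts ++ [PySem.Int.toChars (n + 1) ++ ['\n'] ++ a ++ ['\n'] ++ b ++ ['\n', '\n']]) := by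
  rw [pvWhilePop]
  split
  · rename_i first second restRev h
    simp only [List.reverse_reverse, List.cons.injEq] at h
    obtain ⟨rfl, rfl, rfl⟩ := h
    simp
  · rename_i h
    exact absurd (by simp : (a :: b :: rest).reverse.reverse = a :: b :: rest) (h a b rest)

theorem pvWhilePop_nil (n : Int) (parts : List (List Char)) :
    pvWhilePop ([] : List (List Char)).reverse n parts = parts := by
  rw [pvWhilePop]
  split
  · rename_i first second restRev h
    simp at h
  · rfl

theorem pvWhilePop_single (a : List Char) (n : Int) (parts : List (List Char)) :
    pvWhilePop [a].reverse n parts = parts := by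
  rw [pvWhilePop]
  split
  · rename_i first second restRev h
    simp at h
  · rfl

-- range(2, m+2, 2) = [i + 2 for i in range(0, m, 2)]
theorem pv_pyRange_two_shift (m : Int) :
    PySem.List.pyRange 2 (m + 2) 2 = (PySem.List.pyRange 0 m 2).map (· + 2) := by
  rw [PySem.List.pyRange_of_pos _ _ (by norm_num), PySem.List.pyRange_of_pos _ _ (by norm_num),
    List.map_map]
  have h : (if (2:Int) < m + 2 then ((m + 2 - 2 + 2 - 1) / 2).toNat else 0)
       = (if (0:Int) < m then ((m - 0 + 2 - 1) / 2).toNat else 0) := by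
    split_ifs <;> omega
  rw [h]
  exact (List.map_congr_left fun k _ => by simp only [Function.comp_apply]; ring).symm

-- range(0, m+2, 2) = 0 :: range(2, m+2, 2)  (for 0 <= m)
theorem pv_pyRange_two_cons (m : Int) (hm : 0 ≤ m) :
    PySem.List.pyRange 0 (m + 2) 2 = 0 :: PySem.List.pyRange 2 (m + 2) 2 := by
  rw [PySem.List.pyRange_of_pos _ _ (by norm_num), PySem.List.pyRange_of_pos _ _ (by norm_num)]
  have h1 : (if (0:Int) < m + 2 then ((m + 2 - 0 + 2 - 1) / 2).toNat else 0)
      = (if (2:Int) < m + 2 then ((m + 2 - 2 + 2 - 1) / 2).toNat else 0) + 1 := by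
    split_ifs <;> omega
  rw [h1, List.range_succ_eq_map, List.map_cons, List.map_map]
  refine congrArg₂ _ (by norm_num) ?_
  exact List.map_congr_left fun k _ => by simp only [Function.comp_apply]; push_cast; ring

theorem pv_floordiv_add_two (i : Int) :
    PySem.Int.floordiv (i + 2) 2 = PySem.Int.floordiv i 2 + 1 := by
  rw [PySem.Int.floordiv_eq_ediv_of_pos (a := i + 2) (by norm_num),
    PySem.Int.floordiv_eq_ediv_of_pos (a := i) (by norm_num)]
  omega

-- main invariant: A's fold over range(0, len, 2) with cue numbers offset by n+1, started
-- on the concatenation of parts, equals the join of B's while loop started at counter n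
theorem pv_loop (lines : List (List Char)) : ∀ (n : Int) (parts : List (List Char)),
    (PySem.List.pyRange 0 (PySem.List.len lines) 2).foldl
      (fun vtt i =>
        if i + 1 < PySem.List.len lines then
          vtt ++ PySem.Int.toChars (PySem.Int.floordiv i 2 + (n + 1)) ++ ['\n']
              ++ PySem.List.pyGetD lines i [] ++ ['\n']
              ++ PySem.List.pyGetD lines (i + 1) [] ++ ['\n', '\n']
        else vtt) (PySem.Chars.join [] parts)
    = PySem.Chars.join [] (pvWhilePop lines.reverse n parts) := by
  induction lines using pvPairUp.induct with
  | case2 t ht =>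
    intro n parts
    match t, ht with
    | [], _ =>
      rw [pvWhilePop_nil]
      simp [PySem.List.len_eq, PySem.List.pyRange]
    | [a], _ =>
      rw [pvWhilePop_single]
      have h1 : PySem.List.len ([a] : List (List Char)) = 1 := by simp [PySem.List.len_eq]
      have h0 : PySem.List.pyRange 0 1 2 = [0] := by decide
      rw [h1, h0]
      simp
    | a :: b :: rest, ht => exact absurd rfl (ht a b rest)
  | case1 a b rest ih =>
    intro n parts
    have hm : (0:Int) ≤ (rest.length : Int) := by positivity
    have hlen : PySem.List.len (a :: b :: rest) = (rest.length : Int) + 2 := by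
      simp [PySem.List.len_eq]; ring
    rw [hlen, pv_pyRange_two_cons _ hm, List.foldl_cons, pv_pyRange_two_shift, List.foldl_map]
    have hguard : ((0:Int) + 1 < (rest.length : Int) + 2) := by omega
    rw [if_pos hguard]
    have hbody : ∀ (vtt : List Char), ∀ i ∈ PySem.List.pyRange 0 (rest.length : Int) 2,
        (if i + 2 + 1 < (rest.length : Int) + 2 then
          vtt ++ PySem.Int.toChars (PySem.Int.floordiv (i + 2) 2 + (n + 1)) ++ ['\n']
              ++ PySem.List.pyGetD (a :: b :: rest) (i + 2) [] ++ ['\n']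
              ++ PySem.List.pyGetD (a :: b :: rest) (i + 2 + 1) [] ++ ['\n', '\n']
        else vtt)
        = (if i + 1 < PySem.List.len rest then
          vtt ++ PySem.Int.toChars (PySem.Int.floordiv i 2 + (n + 1 + 1)) ++ ['\n']
              ++ PySem.List.pyGetD rest i [] ++ ['\n']
              ++ PySem.List.pyGetD rest (i + 1) [] ++ ['\n', '\n']
        else vtt) := by
      intro vtt i hi
      have hi0 : 0 ≤ i := ((PySem.List.mem_pyRange_iff_of_pos (by norm_num) i).1 hi).1
      have hiff : (i + 2 + 1 < (rest.length : Int) + 2) ↔ (i + 1 < PySem.List.len rest) := by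
        rw [PySem.List.len_eq]; omega
      rw [if_congr hiff rfl rfl]
      by_cases hg : i + 1 < PySem.List.len rest
      · rw [if_pos hg, if_pos hg, pv_floordiv_add_two]
        have e1 : PySem.List.pyGetD (a :: b :: rest) (i + 2) [] = PySem.List.pyGetD rest i [] := by
          rw [PySem.List.pyGetD_of_nonneg _ _ (by omega), PySem.List.pyGetD_of_nonneg _ _ hi0]
          have : (i + 2).toNat = i.toNat + 2 := by omega
          rw [this]; rfl
        have e2 : PySem.List.pyGetD (a :: b :: rest) (i + 2 + 1) []
            = PySem.List.pyGetD rest (i + 1) [] := by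
          rw [PySem.List.pyGetD_of_nonneg _ _ (by omega), PySem.List.pyGetD_of_nonneg _ _ (by omega)]
          have : (i + 2 + 1).toNat = (i + 1).toNat + 2 := by omega
          rw [this]; rfl
        rw [e1, e2]
        have : PySem.Int.floordiv i 2 + 1 + (n + 1) = PySem.Int.floordiv i 2 + (n + 1 + 1) := by
          ring
        rw [this]
      · rw [if_neg hg, if_neg hg]
    rw [PySem.List.foldl_congr_mem _ _ _ _ hbody,
      show ((rest.length : Int)) = PySem.List.len rest from (PySem.List.len_eq rest).symm]
    rw [pvWhilePop_cons2]
    have hnum : PySem.Int.floordiv 0 2 + (n + 1) = n + 1 := by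
      have : PySem.Int.floordiv 0 2 = 0 := by decide
      rw [this]; ring
    have hget0 : PySem.List.pyGetD (a :: b :: rest) 0 [] = a :=
      PySem.List.pyGetD_zero_cons a (b :: rest) []
    have hget1 : PySem.List.pyGetD (a :: b :: rest) (0 + 1) [] = b := by
      rw [PySem.List.pyGetD_of_nonneg _ _ (by norm_num)]
      norm_num [List.getD]
    rw [hnum, hget0, hget1, ← ih (n + 1)]
    rw [pv_join_append]
    simp [List.append_assoc]

-- ===== VERDICT (by name: the statement is the Claim_ definition above) =====
theorem txt_to_vtt_spec : Claim_equal_txt_to_vtt := by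
  intro content _
  unfold Spec_txt_to_vtt txt_to_vtt txt_to_vtt_alt
  refine congrArg String.ofList ?_
  have h := pv_loop (PySem.Chars.splitlines content.toList) 0 ["WEBVTT\n\n".toList]
  simpa [PySem.Chars.join_singleton] using h
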